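-- pv_equiv track=rewrite | github.com/EmjayAhn/DailyAlgorithm | 02_codingtest/181214_안민재.py | solution
-- ===== SOURCE A (Python) =====
-- def solution(list_numbers):
--     count = dict()
--     for index, number in enumerate(list_numbers):
--         count[number] = index, list_numbers.count(number)
--
--     count = sorted(list(count.items()), key=lambda data: data[1][1], reverse=True)
--
--
--     if count[0][1][1] > (len(list_numbers)//2):
--         return count[0][1][0]
--     else:
--         return -1
-- ===== SOURCE B (Python) =====
-- def solution(list_numbers):
--     # Sort-and-middle: a majority element (count > n//2), if any, must occupy
--     # index n//2 of the sorted copy; verify with one count, then find its last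
--     # index via the reversed list. (Raises IndexError on [], like the original.)
--     n = len(list_numbers)
--     half = n // 2
--     candidate = sorted(list_numbers)[half]
--     if list_numbers.count(candidate) > half:
--         return n - 1 - list_numbers[::-1].index(candidate)
--     return -1
-- ===== Notes on version B (the rewrite author's own statement) =====
-- stated objective: faster
-- what changed: Replaces the per-element frequency dictionary (one list.count per element) plus sort-by-count with sort-and-middle: the majority candidate must sit at sorted(l)[n//2], verified by a single count, and its last index is read off the reversed list.
import Mathlib
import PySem

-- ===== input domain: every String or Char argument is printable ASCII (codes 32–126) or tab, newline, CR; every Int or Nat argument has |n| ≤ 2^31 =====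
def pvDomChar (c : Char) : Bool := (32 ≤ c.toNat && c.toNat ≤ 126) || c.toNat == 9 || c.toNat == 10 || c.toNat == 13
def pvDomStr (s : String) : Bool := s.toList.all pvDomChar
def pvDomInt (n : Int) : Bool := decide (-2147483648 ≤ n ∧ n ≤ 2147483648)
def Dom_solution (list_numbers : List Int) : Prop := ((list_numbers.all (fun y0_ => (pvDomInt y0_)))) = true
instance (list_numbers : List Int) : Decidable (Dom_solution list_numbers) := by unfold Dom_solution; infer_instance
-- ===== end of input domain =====

-- B replaces A's per-element frequency dictionary + sort-by-count with sort-and-middle: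
-- the majority candidate must sit at sorted(l)[n//2]; one count verifies it; equivalence of RETURN values on nonempty lists.

-- ===== PORT A =====
def solution (list_numbers : List Int) : Int :=
  let count := (PySem.List.enumerate list_numbers 0).foldl
      (fun d p => d.insert p.2 (p.1, (list_numbers.count p.2 : Int))) PySem.Dict.empty
  let sortedCount := PySem.List.sorted count.items (fun data => data.2.2) true
  match PySem.List.pyGet? sortedCount 0 with
  | none => -1   -- count[0] is an IndexError in Python (empty input); outside Pre_
  | some top =>
    if top.2.2 > PySem.Int.floordiv (list_numbers.length : Int) 2 then top.2.1 else -1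

-- ===== PORT B =====
def solution_alt (list_numbers : List Int) : Int :=
  let n : Int := list_numbers.length
  let half := PySem.Int.floordiv n 2
  match PySem.List.pyGet? (PySem.List.sorted list_numbers (fun x => x) false) half with
  | none => -1   -- sorted(l)[half] is an IndexError in Python (empty input); outside Pre_
  | some candidate =>
    if (list_numbers.count candidate : Int) > half then
      match PySem.List.index? ((PySem.List.slice? list_numbers none none (-1)).getD []) candidate with
      | some k => n - 1 - (k : Int)
      | none => -1   -- .index ValueError; unreachable since count candidate > 0
    else -1

-- ===== PRECONDITION & SPEC =====
-- Pre_ excludes only the empty list, on which both Pythons raise IndexError.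
def Pre_solution (list_numbers : List Int) : Prop := list_numbers ≠ []
instance (list_numbers : List Int) : Decidable (Pre_solution list_numbers) := by unfold Pre_solution; infer_instance
def pvWitness_solution : List Int := ([1, 2, 1])

def Spec_solution (list_numbers : List Int) (out : Int) : Prop := out = solution_alt list_numbers
instance (list_numbers : List Int) (out : Int) : Decidable (Spec_solution list_numbers out) := by unfold Spec_solution; infer_instance

-- ===== CLAIM (what is proved, stated in full; the proofs are below) =====
def Claim_equal_solution : Prop := ∀ (list_numbers : List Int), Dom_solution list_numbers → Pre_solution list_numbers → Spec_solution list_numbers (solution list_numbers)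

-- ===== LEMMAS AND PROOFS =====

-- index of the LAST occurrence of x in l (none if absent)
def lastIdx? : List Int → Int → Option Nat
  | [], _ => none
  | a :: t, x =>
    match lastIdx? t x with
    | some k => some (k + 1)
    | none => if a = x then some 0 else none

theorem lastIdx?_eq_none_iff (l : List Int) (x : Int) : lastIdx? l x = none ↔ x ∉ l := by
  induction l with
  | nil => simp [lastIdx?]
  | cons a t ih =>
    rcases ht : lastIdx? t x with _ | k
    · have hxt := ih.mp ht
      by_cases hax : a = x
      · simp [lastIdx?, ht, hax]
      · simp only [lastIdx?, ht, if_neg hax, List.mem_cons]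
        constructor
        · intro _ hc
          rcases hc with hc | hc
          · exact hax hc.symm
          · exact hxt hc
        · intro _; trivial
    · have hxt : x ∈ t := by
        by_contra hx
        rw [ih.mpr hx] at ht; cases ht
      simp [lastIdx?, ht, hxt]

theorem lastIdx?_spec (l : List Int) (x : Int) (k : Nat) (h : lastIdx? l x = some k) :
    ∃ hk : k < l.length, l[k] = x ∧ ∀ j (hj : j < l.length), k < j → l[j] ≠ x := by
  induction l generalizing k with
  | nil => simp [lastIdx?] at h
  | cons a t ih =>
    simp only [lastIdx?] at h
    rcases ht : lastIdx? t x with _ | m <;> rw [ht] at h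
    · by_cases hax : a = x
      · rw [if_pos hax] at h
        obtain rfl : k = 0 := by cases h; rfl
        refine ⟨by simp, by simpa using hax, ?_⟩
        intro j hj hjpos
        match j, hj with
        | jj + 1, hj =>
          simp only [List.getElem_cons_succ]
          intro hc
          exact (lastIdx?_eq_none_iff t x).mp ht (hc ▸ List.getElem_mem _)
      · rw [if_neg hax] at h; cases h
    · obtain rfl : k = m + 1 := by cases h; rfl
      obtain ⟨hm, hx, hlast⟩ := ih m ht
      refine ⟨by simpa using Nat.succ_lt_succ hm, by simpa using hx, ?_⟩
      intro j hj hjgt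
      match j, hj with
      | jj + 1, hj =>
        simpa using hlast jj (by simpa using hj) (by omega)

-- the insertion loop of A: last occurrence wins, value is (index, count)
theorem dict_get?_eq (l' l : List Int) (s : Int) (d0 : PySem.Dict Int (Int × Int)) (x : Int) :
    ((PySem.List.enumerate l' s).foldl (fun d p => d.insert p.2 (p.1, (l.count p.2 : Int))) d0).get? x =
      match lastIdx? l' x with
      | some k => some ((s + k, (l.count x : Int)))
      | none => d0.get? x := by
  induction l' generalizing s d0 with
  | nil => simp [PySem.List.enumerate_nil, lastIdx?]
  | cons a t ih =>
    rw [PySem.List.enumerate_cons]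
    simp only [List.foldl_cons]
    rw [ih]
    rcases ht : lastIdx? t x with _ | m
    · simp only [lastIdx?, ht]
      rw [PySem.Dict.get?_insert]
      by_cases hax : a = x
      · subst hax; simp
      · rw [if_neg (fun hc => hax hc.symm), if_neg hax]
    · simp only [lastIdx?, ht]
      congr 2
      push_cast
      ring

theorem index?_count_le (ys : List Int) (x : Int) (a : Nat)
    (h : PySem.List.index? ys x = some a) : ys.count x + a ≤ ys.length := by
  obtain ⟨pre, suf, hys, hlen, hxp⟩ := (PySem.List.index?_eq_some_iff ys x a).mp h
  subst hys
  have h0 : pre.count x = 0 := List.count_eq_zero.mpr hxp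
  have h1 : suf.count x ≤ suf.length := List.count_le_length
  simp [List.count_append, h0]
  omega

theorem index?_of_first (ys : List Int) (x : Int) (m : Nat) (hm : m < ys.length)
    (hx : ys[m] = x) (hfirst : ∀ j (hj : j < ys.length), j < m → ys[j] ≠ x) :
    PySem.List.index? ys x = some m := by
  apply (PySem.List.index?_eq_some_iff ys x m).mpr
  refine ⟨ys.take m, ys.drop (m + 1), ?_, by simp [Nat.min_eq_left (Nat.le_of_lt hm)], ?_⟩
  · conv_lhs => rw [← List.take_append_drop m ys]
    rw [List.drop_eq_getElem_cons hm, hx]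
  · intro hc
    obtain ⟨i, hi, hieq⟩ := List.mem_take_iff_getElem.mp hc
    exact hfirst i (by omega) (by omega) hieq

-- the majority element, if any, sits in the middle of the sorted list
theorem sorted_middle (l : List Int) (x : Int) (hc : l.length / 2 < l.count x) :
    ∃ hlen : l.length / 2 < (PySem.List.sorted l (fun v => v) false).length,
      (PySem.List.sorted l (fun v => v) false)[l.length / 2] = x := by
  have hperm : (PySem.List.sorted l (fun v => v) false).Perm l := PySem.List.sorted_perm l _ false
  set s := PySem.List.sorted l (fun v => v) false with hsdef
  have hlen : s.length = l.length := hperm.length_eq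
  have hcnt : s.count x = l.count x := hperm.count_eq x
  have hcle : l.count x ≤ l.length := hlen ▸ hcnt ▸ List.count_le_length
  have hx : x ∈ s := by
    rw [← List.count_pos_iff, hcnt]; omega
  obtain ⟨a, ha⟩ := Option.isSome_iff_exists.mp ((PySem.List.index?_isSome_iff s x).mpr hx)
  have hab : s.count x + a ≤ s.length := index?_count_le s x a ha
  obtain ⟨haL, haE, _⟩ := PySem.List.getElem_of_index?_eq_some ha
  have hxr : x ∈ s.reverse := by simpa using hx
  obtain ⟨a', ha'⟩ := Option.isSome_iff_exists.mp ((PySem.List.index?_isSome_iff s.reverse x).mpr hxr)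
  have hab' : s.reverse.count x + a' ≤ s.reverse.length := index?_count_le s.reverse x a' ha'
  obtain ⟨haL', haE', _⟩ := PySem.List.getElem_of_index?_eq_some ha'
  rw [List.count_reverse] at hab'
  rw [List.length_reverse] at hab' haL'
  have hbE : s[s.length - 1 - a']'(by omega) = x := by
    rw [← haE']
    rw [List.getElem_reverse]
  have hh : l.length / 2 < s.length := by omega
  refine ⟨hh, ?_⟩
  have h1 : s[a] ≤ s[l.length / 2]'hh := by
    apply PySem.List.sorted_id_getElem_mono l (p := a) (q := l.length / 2) (by omega) (by rw [← hsdef]; omega)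
  have h2 : s[l.length / 2]'hh ≤ s[s.length - 1 - a']'(by omega) := by
    apply PySem.List.sorted_id_getElem_mono l (p := l.length / 2) (q := s.length - 1 - a') (by omega) (by rw [← hsdef]; omega)
  rw [haE] at h1
  rw [hbE] at h2
  omega

theorem index?_reverse_of_lastIdx (l : List Int) (x : Int) (j : Nat) (h : lastIdx? l x = some j) :
    PySem.List.index? l.reverse x = some (l.length - 1 - j) := by
  obtain ⟨hj, hx, hlast⟩ := lastIdx?_spec l x j h
  refine index?_of_first l.reverse x (l.length - 1 - j) (by simp; omega) ?_ ?_
  · rw [List.getElem_reverse]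
    have hidx : l.length - 1 - (l.length - 1 - j) = j := by omega
    simp_rw [hidx]
    exact hx
  · intro i hi hilt
    rw [List.getElem_reverse]
    exact hlast _ (by omega) (by omega)

-- ===== VERDICT =====
theorem solution_spec : Claim_equal_solution := by
  intro l _ hpre
  unfold Spec_solution solution solution_alt Pre_solution at *
  have hn1 : 1 ≤ l.length := List.length_pos_of_ne_nil hpre
  have hhalf : PySem.Int.floordiv (l.length : Int) 2 = ((l.length / 2 : Nat) : Int) := by
    exact_mod_cast PySem.Int.floordiv_natCast l.length 2
  -- ==== A side ====
  set d := (PySem.List.enumerate l 0).foldl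
      (fun d p => d.insert p.2 (p.1, (l.count p.2 : Int))) PySem.Dict.empty with hd
  have hnd : d.keys.Nodup := by
    rw [hd]
    exact PySem.Dict.nodup_keys_foldl_insert_key (PySem.List.enumerate l 0) Prod.snd
      (fun d p => (p.1, (l.count p.2 : Int))) PySem.Dict.empty (by simp)
  have hkeys : d.keys = PySem.Set.ofList l := by
    rw [hd, PySem.Dict.keys_foldl_insert_key (key := Prod.snd)
      (f := fun d p => (p.1, (l.count p.2 : Int)))]
    rw [PySem.List.map_snd_enumerate]
    simp only [PySem.Dict.keys_empty]
    rfl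
  have hgetD : ∀ x ∈ l, ∀ k, lastIdx? l x = some k →
      d.getD x (0, 0) = ((k : Int), (l.count x : Int)) := by
    intro x hx k hk
    have hq : d.get? x = some ((0 + (k : Int), (l.count x : Int))) := by
      rw [hd, dict_get?_eq, hk]
    rw [PySem.Dict.getD_eq_get?_getD, hq]
    simp
  have hitems : d.items = d.keys.map (fun k => (k, d.getD k (0, 0))) :=
    PySem.Dict.items_eq_map_keys d hnd (0, 0)
  -- head of the sorted items list
  have hne : d.items ≠ [] := by
    rw [hitems, hkeys]
    obtain ⟨a, ha⟩ := List.exists_mem_of_ne_nil l hpre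
    have ha' : a ∈ PySem.Set.ofList l := (PySem.Set.mem_ofList _ _).mpr ha
    intro hc
    rw [List.map_eq_nil_iff.mp hc] at ha'
    cases ha'
  rcases hs : PySem.List.sorted d.items (fun data => data.2.2) true with _ | ⟨top, t⟩
  · exact absurd ((PySem.List.sorted_eq_nil_iff _ _ _).mp hs) hne
  have htopmem : top ∈ d.items := by
    rw [← PySem.List.mem_sorted (key := fun data => data.2.2) (rev := true), hs]
    exact List.mem_cons_self
  have hmax : ∀ y ∈ d.items, y.2.2 ≤ top.2.2 := PySem.List.key_head_sorted_rev_ge _ _ hs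
  obtain ⟨c, hck, htop⟩ := by
    rw [hitems] at htopmem
    exact List.mem_map.mp htopmem
  have hcl : c ∈ l := by
    rw [hkeys] at hck
    exact (PySem.Set.mem_ofList _ _).mp hck
  obtain ⟨kc, hkc⟩ : ∃ kc, lastIdx? l c = some kc := by
    rcases hlc : lastIdx? l c with _ | kc
    · exact absurd ((lastIdx?_eq_none_iff l c).mp hlc) (by simpa using hcl)
    · exact ⟨kc, rfl⟩
  have htopv : top = (c, ((kc : Int), (l.count c : Int))) := by
    rw [← htop, hgetD c hcl kc hkc]
  have hmaxcount : ∀ x ∈ l, l.count x ≤ l.count c := by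
    intro x hx
    obtain ⟨kx, hkx⟩ : ∃ kx, lastIdx? l x = some kx := by
      rcases hlx : lastIdx? l x with _ | kx
      · exact absurd ((lastIdx?_eq_none_iff l x).mp hlx) (by simpa using hx)
      · exact ⟨kx, rfl⟩
    have hxmem : (x, d.getD x (0, 0)) ∈ d.items := by
      rw [hitems]
      exact List.mem_map_of_mem (hkeys ▸ (PySem.Set.mem_ofList _ _).mpr hx)
    have := hmax _ hxmem
    rw [hgetD x hx kx hkx, htopv] at this
    simpa using this
  obtain ⟨hkcL, hkcE, hkclast⟩ := lastIdx?_spec l c kc hkc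
  -- ==== B side ====
  have hperm : (PySem.List.sorted l (fun x => x) false).Perm l := PySem.List.sorted_perm l _ false
  have hslen : (PySem.List.sorted l (fun x => x) false).length = l.length := hperm.length_eq
  have hhlt : l.length / 2 < (PySem.List.sorted l (fun x => x) false).length := by omega
  have hcand : PySem.List.pyGet? (PySem.List.sorted l (fun x => x) false) ((l.length / 2 : Nat) : Int)
      = some ((PySem.List.sorted l (fun x => x) false)[l.length / 2]'hhlt) := by
    rw [PySem.List.pyGet?_natCast]
    exact List.getElem?_eq_getElem hhlt
  -- ==== put both sides together ====
  simp only [hs, PySem.List.pyGet?_zero_cons, htopv, hhalf, hcand,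
    PySem.List.slice?_none_none_neg_one, Option.getD_some]
  by_cases hmaj : l.length / 2 < l.count c
  · -- a majority element exists, and it is c
    obtain ⟨hlt, hmid⟩ := sorted_middle l c hmaj
    rw [hmid]
    rw [if_pos (by exact_mod_cast hmaj), if_pos (by exact_mod_cast hmaj)]
    rw [index?_reverse_of_lastIdx l c kc hkc]
    push_cast [Nat.cast_sub (by omega : 1 + kc ≤ l.length)]
    omega
  · -- no majority: both branches are False
    rw [if_neg (by exact_mod_cast hmaj)]
    have hcandl : (PySem.List.sorted l (fun x => x) false)[l.length / 2]'hhlt ∈ l := by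
      rw [← PySem.List.mem_sorted (key := fun x => x) (rev := false)]
      exact List.getElem_mem hhlt
    rw [if_neg ?_]
    have := hmaxcount _ hcandl
    intro hc
    have : l.length / 2 < l.count ((PySem.List.sorted l (fun x => x) false)[l.length / 2]'hhlt) := by
      exact_mod_cast hc
    omega
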